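-- pv_equiv track=rewrite | github.com/Arsen1302/Code-copy-detector | TestData/solutions/problem_180_5.py | solution_180_5
-- ===== SOURCE A (Python) =====
-- def solution_180_5(n: int) -> int:
--     dp = [1]*(n+1)
--     for i in range(1, n+1):
--         count = 0
--         for j in range(i):
--             count += dp[j]*(9-j)
--         dp[i] = count
--     return sum(dp)
-- ===== SOURCE B (Python) =====
-- def solution_180_5(n: int) -> int:
--     # dp telescopes: dp[1] = 9 and dp[i] = dp[i-1] * (11 - i) for i >= 2,
--     # so dp[i] = 0 from i = 11 on; accumulate the answer in one capped pass.
--     if n < 0: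
--         return 0
--     total = 1
--     if n >= 1:
--         dp = 9
--         total += dp
--         for i in range(2, min(n, 10) + 1):
--             dp *= 11 - i
--             total += dp
--     return total
-- ===== Notes on version B (the rewrite author's own statement) =====
-- stated objective: faster
-- what changed: Replaces the O(n^2) DP with nested prefix-sum loops by the telescoped recurrence dp[i] = dp[i-1]*(11-i), which vanishes from i=11 on, so a single pass capped at 10 iterations computes the sum.
import Mathlib
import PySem

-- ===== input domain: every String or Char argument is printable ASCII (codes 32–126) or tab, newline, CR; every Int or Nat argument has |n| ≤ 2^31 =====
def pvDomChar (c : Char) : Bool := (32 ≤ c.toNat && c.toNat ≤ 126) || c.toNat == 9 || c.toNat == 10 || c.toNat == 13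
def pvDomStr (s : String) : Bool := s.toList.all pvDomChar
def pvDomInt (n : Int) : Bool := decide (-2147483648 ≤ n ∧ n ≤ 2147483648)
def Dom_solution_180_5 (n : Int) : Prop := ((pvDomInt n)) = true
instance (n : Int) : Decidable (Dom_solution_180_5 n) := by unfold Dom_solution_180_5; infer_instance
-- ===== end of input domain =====

-- B replaces A's quadratic DP by the telescoped recurrence dp[i] = dp[i-1]*(11-i),
-- which is 0 from i = 11 on, so one pass capped at 10 suffices (objective: faster).

-- ===== PORT A =====
-- [1]*(n+1): a negative repeat count yields [] in Python, matched by Int.toNat = 0.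
-- dp[j] and dp[i] always satisfy 0 ≤ index < len(dp) here, so pyGetD/pySetD are exact.
def solution_180_5 (n : Int) : Int :=
  let dp0 := List.replicate (n + 1).toNat (1 : Int)
  let dp1 := (PySem.List.pyRange 1 (n + 1) 1).foldl
    (fun dp i =>
      let count := (PySem.List.pyRange 0 i 1).foldl
        (fun count j => count + PySem.List.pyGetD dp j 0 * (9 - j)) 0
      PySem.List.pySetD dp i count)
    dp0
  dp1.sum

-- ===== PORT B =====
def solution_180_5_alt (n : Int) : Int :=
  if n < 0 then 0
  else
    let total : Int := 1
    if n ≥ 1 then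
      let dp : Int := 9
      let total := total + dp
      let p := (PySem.List.pyRange 2 (min n 10 + 1) 1).foldl
        (fun (p : Int × Int) i => (p.1 + p.2 * (11 - i), p.2 * (11 - i))) (total, dp)
      p.1
    else total

-- ===== PRECONDITION & SPEC =====
def Spec_solution_180_5 (n : Int) (out : Int) : Prop := out = solution_180_5_alt n
instance (n : Int) (out : Int) : Decidable (Spec_solution_180_5 n out) := by unfold Spec_solution_180_5; infer_instance

-- ===== CLAIM (what is proved, stated in full; the proofs are below) =====
def Claim_equal_solution_180_5 : Prop := ∀ (n : Int), Dom_solution_180_5 n → Spec_solution_180_5 n (solution_180_5 n)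

-- ===== LEMMAS AND PROOFS =====

-- the dp sequence of A: pvG 0 = 1, pvG 1 = 9, pvG (k+2) = pvG (k+1) * (9 - k)
def pvG : Nat → Int
  | 0 => 1
  | 1 => 9
  | (k+2) => pvG (k+1) * (9 - (k : Int))

lemma pvG_zero : ∀ k : Nat, pvG (11 + k) = 0 := by
  intro k
  induction k with
  | zero => decide
  | succ k ih =>
      have h : 11 + (k + 1) = (10 + k) + 2 := by omega
      rw [h, pvG]
      have h2 : (10 + k) + 1 = 11 + k := by omega
      rw [h2, ih, zero_mul]

-- inner-loop sum: Σ_{j=0}^{m} pvG j * (9 - j) = pvG (m+1)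
lemma pvG_sum (m : Nat) :
    ((List.range (m+1)).map (fun j => pvG j * (9 - (j : Int)))).sum = pvG (m+1) := by
  induction m with
  | zero => decide
  | succ m ih =>
      rw [List.range_succ, List.map_append, List.sum_append, ih]
      simp only [List.map_cons, List.map_nil, List.sum_cons, List.sum_nil, add_zero]
      rw [show pvG (m+1+1) = pvG (m+1) * (9 - (m : Int)) from rfl]
      push_cast
      ring

-- evaluating A's inner loop on a list whose first m+1 entries are pvG 0 … pvG m
lemma inner_eval (dp : List Int) (m : Nat)
    (h : ∀ j : Nat, j ≤ m → dp.getD j 0 = pvG j) :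
    (PySem.List.pyRange 0 ((m:Int)+1) 1).foldl
      (fun c j => c + PySem.List.pyGetD dp j 0 * (9 - j)) 0 = pvG (m+1) := by
  have hcast : ((m:Int)+1) = ((m+1 : Nat) : Int) := by push_cast; ring
  rw [hcast, PySem.List.pyRange_zero_natCast, List.foldl_map]
  rw [PySem.List.foldl_congr_mem (List.range (m+1))
      (fun (c : Int) (j : Nat) => c + PySem.List.pyGetD dp (j:Int) 0 * (9 - (j:Int)))
      (fun (c : Int) (j : Nat) => c + (pvG j * (9 - (j:Int)))) 0
      (by intro acc j hj
          have hjm : j ≤ m := by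
            have := List.mem_range.mp hj; omega
          simp only []
          rw [PySem.List.pyGetD_natCast, h j hjm])]
  rw [PySem.List.foldl_add, zero_add, pvG_sum]

-- A's outer loop invariant: after iterations 1..m the first m+1 cells hold pvG, the rest are 1
lemma outer_inv (n' m : Nat) (hm : m ≤ n') :
    (PySem.List.pyRange 1 ((m:Int)+1) 1).foldl
      (fun dp i =>
        let count := (PySem.List.pyRange 0 i 1).foldl
          (fun count j => count + PySem.List.pyGetD dp j 0 * (9 - j)) 0
        PySem.List.pySetD dp i count)
      (List.replicate (n'+1) (1:Int))
    = (List.range (m+1)).map pvG ++ List.replicate (n' - m) 1 := by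
  induction m with
  | zero =>
      rw [PySem.List.pyRange_one_eq_nil (by norm_num)]
      simp [List.replicate_succ, pvG]
  | succ m ih =>
      have hm' : m ≤ n' := by omega
      have hsplit : ((m+1 : Nat) : Int) + 1 = ((m:Int)+1) + 1 := by push_cast; ring
      rw [hsplit, PySem.List.pyRange_one_succ_right (by omega), List.foldl_append, ih hm']
      have hlenP : ((List.range (m+1)).map pvG).length = m + 1 := by simp
      simp only [List.foldl_cons, List.foldl_nil]
      have hget : ∀ j : Nat, j ≤ m →
          ((List.range (m+1)).map pvG ++ List.replicate (n' - m) (1:Int)).getD j 0 = pvG j := by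
        intro j hj
        have hjlen : j < ((List.range (m+1)).map pvG).length := by omega
        rw [List.getD_eq_getElem?_getD, List.getElem?_append_left hjlen]
        simp [List.getElem?_map, List.getElem?_range (by omega : j < m+1)]
      rw [inner_eval ((List.range (m+1)).map pvG ++ List.replicate (n' - m) 1) m hget]
      rw [show ((m:Int)+1) = ((m+1 : Nat) : Int) by push_cast; ring, PySem.List.pySetD_natCast]
      rw [show List.replicate (n' - m) (1:Int) = 1 :: List.replicate (n' - (m+1)) 1 by
            rw [show n' - m = (n' - (m+1)) + 1 by omega, List.replicate_succ]]
      rw [List.set_append_right _ _ (by omega)]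
      rw [List.range_succ (n := m+1), List.map_append]
      simp [hlenP]

-- A computed in closed form for 0 ≤ n
lemma A_eval (n : Int) (h : 0 ≤ n) :
    solution_180_5 n = ((List.range (n.toNat+1)).map pvG).sum := by
  show (((PySem.List.pyRange 1 (n + 1) 1).foldl _ (List.replicate (n + 1).toNat (1:Int))).sum) = _
  rw [show (n + 1).toNat = n.toNat + 1 by omega,
      show n + 1 = ((n.toNat : Int)) + 1 by omega,
      outer_inv n.toNat n.toNat (le_refl _)]
  simp

lemma sum_large : ∀ k : Nat, ((List.range (11 + k + 1)).map pvG).sum = 8877691 := by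
  intro k
  induction k with
  | zero => decide
  | succ k ih =>
      rw [show 11 + (k+1) + 1 = (11 + k + 1) + 1 by omega,
          List.range_succ, List.map_append, List.sum_append, ih]
      simp only [List.map_cons, List.map_nil, List.sum_cons, List.sum_nil, add_zero]
      rw [show 11 + k + 1 = 11 + (k + 1) by omega, pvG_zero]
      simp

lemma B_large (n : Int) (h : 10 ≤ n) : solution_180_5_alt n = 8877691 := by
  unfold solution_180_5_alt
  rw [if_neg (by omega), if_pos (by omega), min_eq_right h]
  decide

-- ===== VERDICT (by name: the statement is the Claim_ definition above) =====
theorem solution_180_5_spec : Claim_equal_solution_180_5 := by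
  intro n _
  unfold Spec_solution_180_5
  rcases lt_or_ge n 0 with hneg | hpos
  · -- n < 0: A's list is empty and its loop runs zero times; B returns 0
    show (((PySem.List.pyRange 1 (n + 1) 1).foldl _ (List.replicate (n + 1).toNat (1:Int))).sum) = _
    unfold solution_180_5_alt
    rw [if_pos hneg]
    rw [show (n + 1).toNat = 0 by omega, PySem.List.pyRange_one_eq_nil (by omega)]
    simp
  · by_cases hsmall : n ≤ 10
    · interval_cases n <;> decide
    · rw [A_eval n (by omega), B_large n (by omega)]
      obtain ⟨k, hk⟩ : ∃ k, n.toNat = 11 + k := ⟨n.toNat - 11, by omega⟩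
      rw [hk, sum_large]
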